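-- pv_equiv track=rewrite | github.com/uhh-lt/cam | src/sentence_analyzer.py | is_better_than
-- ===== SOURCE A (Python) =====
-- betterMarkers = ['better', 'easier', 'faster', 'nicer', 'wiser', 'cooler', 'decent', 'safer', 'superior', 'solid', 'terrific']
--
-- worseMarkers = ['worse', 'harder', 'slower', 'poorly', 'uglier', 'poorer', 'lousy', 'nastier', 'inferior', 'mediocre']
--
-- def is_better_than(sentence, objA, objB):
--     '''
--     Analyzes a sentence that contains two given objects. Returns objA, if the sentence
--     suggests that objA is "better" than objB, objB if it suggests the opposite and
--     False if the sentence doesn't suggest a clear answer.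
--
--     sentence:   String
--                 the sentence to is_better_than. Has to contain objA and objB.
--     objA:       String
--                 the first object to be compared to the second.
--     objB:       String
--                 the second object to be compared to the first.
--     '''
--     aPos = sentence.find(objA) #position of objectA in sentence
--     bPos = sentence.find(objB) #position of objectB in sentence
--     if aPos < bPos:
--         n = sentence.find('not', aPos, bPos) #looks for a 'not' between A and B
--     else:
--         n = sentence.find('not', bPos, aPos) #looks for a 'not' between B and A
--     for s in betterMarkers: #look for a betterMarker
--         pos = sentence.find(s)
--         if pos != -1: #found a betterMarker in sentence
--             if (pos < aPos and pos > bPos): #betterMarker is between B and A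
--                 if n != -1: #a 'not' exists between the objects
--                     return True
--                 else:
--                     return False
--             elif (pos > aPos and pos < bPos): #betterMarker is between A and B
--                 if n != -1: #a 'not' exists between the objects
--                     return False
--                 else:
--                     return True
--     for s in worseMarkers: #look for a worseMarker
--         pos = sentence.find(s)
--         if pos != -1: #found a worseMarker in sentence
--             if (pos < aPos and pos > bPos): #worseMarker is between B and A
--                 if n != -1: #a 'not' exists between the objects
--                     return False
--                 else:
--                     return True
--             elif (pos > aPos and pos < bPos): #worseMarker is between A and B
--                 if n != -1: #a 'not' exists between the objects
--                     return True
--                 else: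
--                     return False
--     return None #no better or worse marker was found between both objects
-- ===== SOURCE B (Python) =====
-- betterMarkers = ['better', 'easier', 'faster', 'nicer', 'wiser', 'cooler', 'decent', 'safer', 'superior', 'solid', 'terrific']
--
-- worseMarkers = ['worse', 'harder', 'slower', 'poorly', 'uglier', 'poorer', 'lousy', 'nastier', 'inferior', 'mediocre']
--
-- def is_better_than(sentence, objA, objB):
--     aPos = sentence.find(objA)
--     bPos = sentence.find(objB)
--     lo, hi = (aPos, bPos) if aPos < bPos else (bPos, aPos)
--     base = (aPos < bPos) != (sentence.find('not', lo, hi) != -1)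
--     pending = [(m, True) for m in betterMarkers] + [(m, False) for m in worseMarkers]
--     better_hit = worse_hit = False
--     for p in range(len(sentence)):
--         matched = [mc for mc in pending if sentence.startswith(mc[0], p)]
--         pending = [mc for mc in pending if not sentence.startswith(mc[0], p)]
--         if lo < p < hi:
--             better_hit = better_hit or any(c for _, c in matched)
--             worse_hit = worse_hit or any(not c for _, c in matched)
--     if better_hit:
--         return base
--     if worse_hit:
--         return not base
--     return None
-- ===== Notes on version B (the rewrite author's own statement) =====
-- stated objective: alternative
-- what changed: Instead of A's two staged per-marker loops each calling sentence.find, B makes one left-to-right scan over the positions of the sentence, matching a shrinking pending set of tagged markers with startswith (so each marker is classified at its first occurrence) and accumulating two class flags, then decides the verdict once from the flags and a precomputed (order XOR 'not') boolean.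
import Mathlib
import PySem

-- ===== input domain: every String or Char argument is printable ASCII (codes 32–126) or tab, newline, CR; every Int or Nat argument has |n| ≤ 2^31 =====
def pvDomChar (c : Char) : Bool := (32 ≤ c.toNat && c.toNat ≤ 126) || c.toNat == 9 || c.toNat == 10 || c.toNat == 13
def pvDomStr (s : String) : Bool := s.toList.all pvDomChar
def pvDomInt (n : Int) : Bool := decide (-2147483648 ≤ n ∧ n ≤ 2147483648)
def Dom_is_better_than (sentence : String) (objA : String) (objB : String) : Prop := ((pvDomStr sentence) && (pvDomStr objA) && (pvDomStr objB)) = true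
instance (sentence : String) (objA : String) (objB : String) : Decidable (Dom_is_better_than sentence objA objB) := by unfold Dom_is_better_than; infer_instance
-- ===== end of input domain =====

-- B replaces A's staged per-marker find-loops by one left-to-right scan of the sentence
-- positions with a shrinking pending-marker list and two class flags; objective: alternative.


-- ===== PORT A =====
def betterMarkers : List String := ["better", "easier", "faster", "nicer", "wiser", "cooler", "decent", "safer", "superior", "solid", "terrific"]

def worseMarkers : List String := ["worse", "harder", "slower", "poorly", "uglier", "poorer", "lousy", "nastier", "inferior", "mediocre"]

-- first loop of A: scan betterMarkers; some v = 'return v', none = fall through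
def betterLoop (sentence : String) (aPos bPos n : Int) : List String → Option Bool
  | [] => none
  | m :: rest =>
    let pos := PySem.Str.find sentence m
    if pos ≠ -1 then
      if pos < aPos ∧ pos > bPos then
        some (if n ≠ -1 then true else false)
      else if pos > aPos ∧ pos < bPos then
        some (if n ≠ -1 then false else true)
      else betterLoop sentence aPos bPos n rest
    else betterLoop sentence aPos bPos n rest

-- second loop of A: scan worseMarkers
def worseLoop (sentence : String) (aPos bPos n : Int) : List String → Option Bool
  | [] => none
  | m :: rest =>
    let pos := PySem.Str.find sentence m
    if pos ≠ -1 then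
      if pos < aPos ∧ pos > bPos then
        some (if n ≠ -1 then false else true)
      else if pos > aPos ∧ pos < bPos then
        some (if n ≠ -1 then true else false)
      else worseLoop sentence aPos bPos n rest
    else worseLoop sentence aPos bPos n rest

def is_better_than (sentence : String) (objA : String) (objB : String) : Option Bool :=
  let aPos := PySem.Str.find sentence objA
  let bPos := PySem.Str.find sentence objB
  let n := if aPos < bPos then PySem.Str.findFrom sentence "not" aPos (some bPos)
           else PySem.Str.findFrom sentence "not" bPos (some aPos)
  match betterLoop sentence aPos bPos n betterMarkers with
  | some v => some v
  | none =>
    match worseLoop sentence aPos bPos n worseMarkers with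
    | some v => some v
    | none => none

-- ===== PORT B =====
-- B's position scan: for p in range(len(sentence)), match the pending markers at p
-- ('sentence.startswith(mc[0], p)' for 0 ≤ p ≤ len is exactly 'startswith on s.drop p'),
-- drop the matched ones from pending, and when p is strictly inside the window
-- accumulate the two class flags.
def scanLoop (s : List Char) (lo hi : Int) : List Nat → List (String × Bool) → Bool → Bool → Bool × Bool
  | [], _, bh, wh => (bh, wh)
  | p :: ps, pending, bh, wh =>
    let matched := pending.filter (fun mc => PySem.Chars.startswith (s.drop p) mc.1.toList)
    let pending' := pending.filter (fun mc => !PySem.Chars.startswith (s.drop p) mc.1.toList)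
    if lo < (p : Int) ∧ (p : Int) < hi then
      scanLoop s lo hi ps pending' (bh || matched.any (fun mc => mc.2)) (wh || matched.any (fun mc => !mc.2))
    else
      scanLoop s lo hi ps pending' bh wh

def is_better_than_alt (sentence : String) (objA : String) (objB : String) : Option Bool :=
  let aPos := PySem.Str.find sentence objA
  let bPos := PySem.Str.find sentence objB
  let lo := if aPos < bPos then aPos else bPos
  let hi := if aPos < bPos then bPos else aPos
  let base := xor (decide (aPos < bPos)) (decide (PySem.Str.findFrom sentence "not" lo (some hi) ≠ -1))
  let pending := betterMarkers.map (fun m => (m, true)) ++ worseMarkers.map (fun m => (m, false))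
  let r := scanLoop sentence.toList lo hi (List.range sentence.toList.length) pending false false
  if r.1 then some base
  else if r.2 then some (!base)
  else none

-- ===== PRECONDITION & SPEC =====
def Spec_is_better_than (sentence : String) (objA : String) (objB : String) (out : Option Bool) : Prop := out = is_better_than_alt sentence objA objB
instance (sentence : String) (objA : String) (objB : String) (out : Option Bool) : Decidable (Spec_is_better_than sentence objA objB out) := by unfold Spec_is_better_than; infer_instance

-- ===== CLAIM (what is proved, stated in full; the proofs are below) =====
def Claim_equal_is_better_than : Prop := ∀ (sentence : String) (objA : String) (objB : String), Dom_is_better_than sentence objA objB → Spec_is_better_than sentence objA objB (is_better_than sentence objA objB)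

-- ===== LEMMAS AND PROOFS =====

-- the window predicate both characterizations share
def inWin (s : List Char) (lo hi : Int) (m : String) : Bool :=
  decide (lo < PySem.Chars.find s m.toList ∧ PySem.Chars.find s m.toList < hi)

theorem any_congr_mem {α : Type} (l : List α) (f g : α → Bool) (h : ∀ x ∈ l, f x = g x) :
    l.any f = l.any g := by
  induction l with
  | nil => rfl
  | cons x xs ih =>
    simp only [List.any_cons, h x (by simp), ih (fun y hy => h y (by simp [hy]))]

theorem any_filter_split {α : Type} (l : List α) (q f : α → Bool) :
    l.any f = ((l.filter q).any f || (l.filter (fun x => !q x)).any f) := by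
  induction l with
  | nil => rfl
  | cons x xs ih =>
    by_cases h : q x = true <;>
      simp [h, ih, Bool.or_assoc, Bool.or_left_comm]

-- find points at the first occurrence
theorem find_eq_of_first (s m : List Char) (p : Nat)
    (hp : m <+: s.drop p) (hmin : ∀ q < p, ¬ m <+: s.drop q) :
    PySem.Chars.find s m = (p : Int) := by
  have hin : PySem.Chars.isIn m s = true :=
    (PySem.Chars.exists_prefix_drop_iff_isIn m s).1 ⟨p, hp⟩
  have h0 : 0 ≤ PySem.Chars.find s m :=
    (PySem.Chars.find_nonneg_iff s m).2 ((PySem.Chars.isIn_iff_infix m s).1 hin)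
  obtain ⟨hpre, hfmin⟩ := PySem.Chars.find_spec h0
  rcases lt_trichotomy (PySem.Chars.find s m).toNat p with h | h | h
  · exact absurd hpre (hmin _ h)
  · omega
  · exact absurd hp (hfmin p h)

-- a marker with no occurrence anywhere is not found
theorem find_eq_neg_one_of_no_occ (s m : List Char) (h : ∀ q, ¬ m <+: s.drop q) :
    PySem.Chars.find s m = -1 := by
  apply (PySem.Chars.find_eq_neg_one_iff s m).2
  intro hinf
  have := (PySem.Chars.exists_prefix_drop_iff_isIn m s).2 ((PySem.Chars.isIn_iff_infix m s).2 hinf)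
  obtain ⟨j, hj⟩ := this
  exact h j hj

-- B's scan computes, per marker class, "some pending marker's first occurrence is in the window"
theorem scan_spec (s : List Char) (lo hi : Int) (hlo : -1 ≤ lo) :
    ∀ (k p0 : Nat) (pending : List (String × Bool)) (bh wh : Bool),
      p0 + k = s.length →
      (∀ mc ∈ pending, mc.1.toList ≠ []) →
      (∀ mc ∈ pending, ∀ q < p0, ¬ mc.1.toList <+: s.drop q) →
      scanLoop s lo hi (List.range' p0 k) pending bh wh =
        (bh || pending.any (fun mc => mc.2 && inWin s lo hi mc.1),
         wh || pending.any (fun mc => !mc.2 && inWin s lo hi mc.1)) := by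
  intro k
  induction k with
  | zero =>
    intro p0 pending bh wh hlen hne hno
    have hzero : ∀ mc ∈ pending, inWin s lo hi mc.1 = false := by
      intro mc hmc
      have hnoc : ∀ q, ¬ mc.1.toList <+: s.drop q := by
        intro q hq
        by_cases hql : q < p0
        · exact hno mc hmc q hql hq
        · have : s.drop q = [] := by
            apply List.drop_eq_nil_of_le; omega
          rw [this] at hq
          exact hne mc hmc (List.prefix_nil.mp hq)
      have := find_eq_neg_one_of_no_occ s mc.1.toList hnoc
      simp only [inWin, this]
      simp only [decide_eq_false_iff_not, not_and]
      intro hcon; omega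
    have h1 : pending.any (fun mc => mc.2 && inWin s lo hi mc.1) = false := by
      simp only [List.any_eq_false]
      intro mc hmc; simp [hzero mc hmc]
    have h2 : pending.any (fun mc => !mc.2 && inWin s lo hi mc.1) = false := by
      simp only [List.any_eq_false]
      intro mc hmc; simp [hzero mc hmc]
    simp [scanLoop, h1, h2]
  | succ k ih =>
    intro p0 pending bh wh hlen hne hno
    rw [List.range'_succ]
    simp only [scanLoop]
    have hmatched : ∀ mc ∈ pending.filter (fun mc => PySem.Chars.startswith (s.drop p0) mc.1.toList),
        PySem.Chars.find s mc.1.toList = (p0 : Int) := by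
      intro mc hmc
      rw [List.mem_filter] at hmc
      exact find_eq_of_first s mc.1.toList p0
        ((PySem.Chars.startswith_iff _ _).1 hmc.2)
        (hno mc hmc.1)
    have hne' : ∀ mc ∈ pending.filter (fun mc => !PySem.Chars.startswith (s.drop p0) mc.1.toList),
        mc.1.toList ≠ [] := fun mc hmc => hne mc (List.mem_of_mem_filter hmc)
    have hno' : ∀ mc ∈ pending.filter (fun mc => !PySem.Chars.startswith (s.drop p0) mc.1.toList),
        ∀ q < p0 + 1, ¬ mc.1.toList <+: s.drop q := by
      intro mc hmc q hq
      rw [List.mem_filter] at hmc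
      by_cases hql : q < p0
      · exact hno mc hmc.1 q hql
      · have hq0 : q = p0 := by omega
        subst hq0
        intro hpre
        have := (PySem.Chars.startswith_iff (s.drop q) mc.1.toList).2 hpre
        simp [this] at hmc
    have hlen' : p0 + 1 + k = s.length := by omega
    have hsplit1 := any_filter_split pending
      (fun mc => PySem.Chars.startswith (s.drop p0) mc.1.toList)
      (fun mc => mc.2 && inWin s lo hi mc.1)
    have hsplit2 := any_filter_split pending
      (fun mc => PySem.Chars.startswith (s.drop p0) mc.1.toList)
      (fun mc => !mc.2 && inWin s lo hi mc.1)
    by_cases hw : lo < (p0 : Int) ∧ (p0 : Int) < hi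
    · rw [if_pos hw]
      rw [ih (p0 + 1) _ _ _ hlen' hne' hno']
      have hwin : ∀ mc ∈ pending.filter (fun mc => PySem.Chars.startswith (s.drop p0) mc.1.toList),
          inWin s lo hi mc.1 = true := by
        intro mc hmc
        simp only [inWin, hmatched mc hmc]
        exact decide_eq_true hw
      have e1 : (pending.filter (fun mc => PySem.Chars.startswith (s.drop p0) mc.1.toList)).any
          (fun mc => mc.2 && inWin s lo hi mc.1) =
          (pending.filter (fun mc => PySem.Chars.startswith (s.drop p0) mc.1.toList)).any
          (fun mc => mc.2) := by
        apply any_congr_mem; intro mc hmc; simp [hwin mc hmc]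
      have e2 : (pending.filter (fun mc => PySem.Chars.startswith (s.drop p0) mc.1.toList)).any
          (fun mc => !mc.2 && inWin s lo hi mc.1) =
          (pending.filter (fun mc => PySem.Chars.startswith (s.drop p0) mc.1.toList)).any
          (fun mc => !mc.2) := by
        apply any_congr_mem; intro mc hmc; simp [hwin mc hmc]
      rw [hsplit1, hsplit2, e1, e2]
      simp [Bool.or_assoc]
    · rw [if_neg hw]
      rw [ih (p0 + 1) _ _ _ hlen' hne' hno']
      have e1 : (pending.filter (fun mc => PySem.Chars.startswith (s.drop p0) mc.1.toList)).any
          (fun mc => mc.2 && inWin s lo hi mc.1) = false := by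
        simp only [List.any_eq_false]
        intro mc hmc
        simp only [inWin, hmatched mc hmc]
        simp [hw]
      have e2 : (pending.filter (fun mc => PySem.Chars.startswith (s.drop p0) mc.1.toList)).any
          (fun mc => !mc.2 && inWin s lo hi mc.1) = false := by
        simp only [List.any_eq_false]
        intro mc hmc
        simp only [inWin, hmatched mc hmc]
        simp [hw]
      rw [hsplit1, hsplit2, e1, e2]
      simp

-- A's first loop returns base iff some better marker's occurrence is in the window
theorem betterLoop_any (sentence : String) (aPos bPos n : Int)
    (ha : -1 ≤ aPos) (hb : -1 ≤ bPos) (ms : List String) :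
    betterLoop sentence aPos bPos n ms =
      (if ms.any (inWin sentence.toList (if aPos < bPos then aPos else bPos)
            (if aPos < bPos then bPos else aPos)) = true
       then some (xor (decide (aPos < bPos)) (decide (n ≠ -1)))
       else none) := by
  induction ms with
  | nil => rfl
  | cons m rest ih =>
    have hfind : PySem.Str.find sentence m = PySem.Chars.find sentence.toList m.toList := by
      rw [PySem.Str.find_eq]
    simp only [betterLoop, List.any_cons]
    by_cases hw : (if aPos < bPos then aPos else bPos) < PySem.Str.find sentence m ∧
        PySem.Str.find sentence m < (if aPos < bPos then bPos else aPos)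
    · have hwt : inWin sentence.toList (if aPos < bPos then aPos else bPos)
          (if aPos < bPos then bPos else aPos) m = true := by
        simp only [inWin, ← hfind]; exact decide_eq_true hw
      have hne : PySem.Str.find sentence m ≠ -1 := by
        rcases hw with ⟨h1, _⟩; split at h1 <;> omega
      by_cases hab : aPos < bPos
      · have h1 : ¬ (PySem.Str.find sentence m < aPos ∧ PySem.Str.find sentence m > bPos) := by
          simp only [hab, if_pos] at hw; omega
        have h2 : PySem.Str.find sentence m > aPos ∧ PySem.Str.find sentence m < bPos := by
          simp only [hab, if_pos] at hw; omega
        simp only [if_pos hab] at hwt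
        rw [if_pos hne, if_neg h1, if_pos h2]
        by_cases hn : n ≠ -1 <;> simp [hn, hab, hwt]
      · have h1 : PySem.Str.find sentence m < aPos ∧ PySem.Str.find sentence m > bPos := by
          simp only [hab] at hw; omega
        simp only [if_neg hab] at hwt
        rw [if_pos hne, if_pos h1]
        by_cases hn : n ≠ -1 <;> simp [hn, hab, hwt]
    · have hwf : inWin sentence.toList (if aPos < bPos then aPos else bPos)
          (if aPos < bPos then bPos else aPos) m = false := by
        simp only [inWin, ← hfind]; exact decide_eq_false hw
      have h1 : ¬ (PySem.Str.find sentence m < aPos ∧ PySem.Str.find sentence m > bPos) := by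
        intro h; exact hw (by constructor <;> (split <;> omega))
      have h2 : ¬ (PySem.Str.find sentence m > aPos ∧ PySem.Str.find sentence m < bPos) := by
        intro h; exact hw (by constructor <;> (split <;> omega))
      simp only [hwf, Bool.false_or]
      by_cases hne : PySem.Str.find sentence m ≠ -1
      · rw [if_pos hne, if_neg h1, if_neg h2]; exact ih
      · rw [if_neg hne]; exact ih

-- A's second loop returns !base iff some worse marker's occurrence is in the window
theorem worseLoop_any (sentence : String) (aPos bPos n : Int)
    (ha : -1 ≤ aPos) (hb : -1 ≤ bPos) (ms : List String) :
    worseLoop sentence aPos bPos n ms =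
      (if ms.any (inWin sentence.toList (if aPos < bPos then aPos else bPos)
            (if aPos < bPos then bPos else aPos)) = true
       then some (!(xor (decide (aPos < bPos)) (decide (n ≠ -1))))
       else none) := by
  induction ms with
  | nil => rfl
  | cons m rest ih =>
    have hfind : PySem.Str.find sentence m = PySem.Chars.find sentence.toList m.toList := by
      rw [PySem.Str.find_eq]
    simp only [worseLoop, List.any_cons]
    by_cases hw : (if aPos < bPos then aPos else bPos) < PySem.Str.find sentence m ∧
        PySem.Str.find sentence m < (if aPos < bPos then bPos else aPos)
    · have hwt : inWin sentence.toList (if aPos < bPos then aPos else bPos)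
          (if aPos < bPos then bPos else aPos) m = true := by
        simp only [inWin, ← hfind]; exact decide_eq_true hw
      have hne : PySem.Str.find sentence m ≠ -1 := by
        rcases hw with ⟨h1, _⟩; split at h1 <;> omega
      by_cases hab : aPos < bPos
      · have h1 : ¬ (PySem.Str.find sentence m < aPos ∧ PySem.Str.find sentence m > bPos) := by
          simp only [hab, if_pos] at hw; omega
        have h2 : PySem.Str.find sentence m > aPos ∧ PySem.Str.find sentence m < bPos := by
          simp only [hab, if_pos] at hw; omega
        simp only [if_pos hab] at hwt
        rw [if_pos hne, if_neg h1, if_pos h2]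
        by_cases hn : n ≠ -1 <;> simp [hn, hab, hwt]
      · have h1 : PySem.Str.find sentence m < aPos ∧ PySem.Str.find sentence m > bPos := by
          simp only [hab] at hw; omega
        simp only [if_neg hab] at hwt
        rw [if_pos hne, if_pos h1]
        by_cases hn : n ≠ -1 <;> simp [hn, hab, hwt]
    · have hwf : inWin sentence.toList (if aPos < bPos then aPos else bPos)
          (if aPos < bPos then bPos else aPos) m = false := by
        simp only [inWin, ← hfind]; exact decide_eq_false hw
      have h1 : ¬ (PySem.Str.find sentence m < aPos ∧ PySem.Str.find sentence m > bPos) := by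
        intro h; exact hw (by constructor <;> (split <;> omega))
      have h2 : ¬ (PySem.Str.find sentence m > aPos ∧ PySem.Str.find sentence m < bPos) := by
        intro h; exact hw (by constructor <;> (split <;> omega))
      simp only [hwf, Bool.false_or]
      by_cases hne : PySem.Str.find sentence m ≠ -1
      · rw [if_pos hne, if_neg h1, if_neg h2]; exact ih
      · rw [if_neg hne]; exact ih

-- ===== VERDICT (by name: the statement is the Claim_ definition above) =====
theorem is_better_than_spec : Claim_equal_is_better_than := by
  intro sentence objA objB _
  unfold Spec_is_better_than is_better_than is_better_than_alt
  dsimp only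
  have ha : (-1 : Int) ≤ PySem.Str.find sentence objA := by
    rw [PySem.Str.find_eq]; exact PySem.Chars.neg_one_le_find _ _
  have hb : (-1 : Int) ≤ PySem.Str.find sentence objB := by
    rw [PySem.Str.find_eq]; exact PySem.Chars.neg_one_le_find _ _
  set aPos := PySem.Str.find sentence objA with haP
  set bPos := PySem.Str.find sentence objB with hbP
  set lo := if aPos < bPos then aPos else bPos with hlodef
  set hi := if aPos < bPos then bPos else aPos with hhidef
  have hlo : (-1 : Int) ≤ lo := by rw [hlodef]; split <;> omega
  have hn : (if aPos < bPos then PySem.Str.findFrom sentence "not" aPos (some bPos)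
      else PySem.Str.findFrom sentence "not" bPos (some aPos))
      = PySem.Str.findFrom sentence "not" lo (some hi) := by
    rw [hlodef, hhidef]; split <;> rfl
  rw [hn]
  set base := xor (decide (aPos < bPos))
    (decide (PySem.Str.findFrom sentence "not" lo (some hi) ≠ -1)) with hbase
  -- reduce B's scan to per-class any's
  rw [List.range_eq_range']
  rw [scan_spec sentence.toList lo hi hlo sentence.toList.length 0 _ false false
    (by omega) (by decide) (by intro mc _ q hq; omega)]
  simp only [Bool.false_or, List.any_append, List.any_map]
  have eB : betterMarkers.any ((fun mc => mc.2 && inWin sentence.toList lo hi mc.1) ∘ fun m => (m, true)) =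
      betterMarkers.any (inWin sentence.toList lo hi) := by
    apply any_congr_mem; intro m _; simp [Function.comp]
  have eW1 : worseMarkers.any ((fun mc => mc.2 && inWin sentence.toList lo hi mc.1) ∘ fun m => (m, false)) = false := by
    simp [Function.comp]
  have eW2 : betterMarkers.any ((fun mc => !mc.2 && inWin sentence.toList lo hi mc.1) ∘ fun m => (m, true)) = false := by
    simp [Function.comp]
  have eW3 : worseMarkers.any ((fun mc => !mc.2 && inWin sentence.toList lo hi mc.1) ∘ fun m => (m, false)) =
      worseMarkers.any (inWin sentence.toList lo hi) := by
    apply any_congr_mem; intro m _; simp [Function.comp]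
  rw [betterLoop_any sentence aPos bPos _ ha hb, worseLoop_any sentence aPos bPos _ ha hb]
  rw [← hlodef, ← hhidef, ← hbase]
  simp only [eB, eW1, eW2, eW3, Bool.false_or, Bool.or_false]
  by_cases hB : betterMarkers.any (inWin sentence.toList lo hi) = true
  · simp only [if_pos hB]
  · simp only [if_neg hB]
    by_cases hW : worseMarkers.any (inWin sentence.toList lo hi) = true
    · simp only [if_pos hW]
    · simp only [if_neg hW]
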